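-- pv_equiv track=rewrite | github.com/KinderRiven/tieba_spider | Tieba/Tieba.py | deal_image_url
-- ===== SOURCE A (Python) =====
-- def deal_image_url(url):
--     size = len(url)
--     new_url = ""
--     for i in range(size - 1, -1, -1):
--         if url[i] == '/':
--             break
--         new_url = url[i] + new_url
--     return new_url
-- ===== SOURCE B (Python) =====
-- def deal_image_url(url):
--     return url.split('/')[-1]
-- ===== Notes on version B (the rewrite author's own statement) =====
-- stated objective: idiomatic
-- what changed: replaces A's backward index loop that prepends characters one by one (quadratic string rebuilding) with a single forward str.split('/') and taking the last segment
import Mathlib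
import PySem

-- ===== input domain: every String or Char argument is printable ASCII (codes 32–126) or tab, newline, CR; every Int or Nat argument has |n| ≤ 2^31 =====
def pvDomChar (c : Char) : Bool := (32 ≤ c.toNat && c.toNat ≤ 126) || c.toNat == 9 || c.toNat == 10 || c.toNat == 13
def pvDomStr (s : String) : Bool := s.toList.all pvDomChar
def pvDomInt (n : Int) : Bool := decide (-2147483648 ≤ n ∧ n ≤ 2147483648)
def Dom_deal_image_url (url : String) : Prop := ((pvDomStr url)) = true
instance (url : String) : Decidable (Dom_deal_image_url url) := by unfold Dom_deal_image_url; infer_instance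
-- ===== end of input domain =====

-- B replaces A's backward index loop (prepend characters until the first '/' from the end)
-- with the idiomatic url.split('/')[-1]; equivalence of the two is proved below.

-- ===== PORT A =====
-- A's loop 'for i in range(size-1,-1,-1)' reads url[size-1], …, url[0] in order,
-- i.e. it traverses url.toList.reverse; 'break' on '/' is the first match case,
-- and 'new_url = url[i] + new_url' prepends the character to the accumulator.
def dealALoop : List Char → List Char → List Char
  | [], acc => acc
  | c :: rest, acc => if c = '/' then acc else dealALoop rest (c :: acc)

def deal_image_url (url : String) : String :=
  String.ofList (dealALoop url.toList.reverse [])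

-- ===== PORT B =====
-- url.split('/') → PySem.Str.split?; '/' ≠ '' so the none branch is unreachable,
-- and split always yields a nonempty list, so parts[-1] is its last element.
def deal_image_url_alt (url : String) : String :=
  match PySem.Str.split? url "/" with
  | some parts => parts.getLast!
  | none => ""

-- ===== PRECONDITION & SPEC =====
def Spec_deal_image_url (url : String) (out : String) : Prop := out = deal_image_url_alt url
instance (url : String) (out : String) : Decidable (Spec_deal_image_url url out) := by unfold Spec_deal_image_url; infer_instance

-- ===== CLAIM (what is proved, stated in full; the proofs are below) =====
def Claim_equal_deal_image_url : Prop := ∀ (url : String), Dom_deal_image_url url → Spec_deal_image_url url (deal_image_url url)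

-- ===== LEMMAS AND PROOFS =====

/-- The suffix of `l` after its last `'/'` (all of `l` if there is none). -/
def afterSlash (l : List Char) : List Char := (l.reverse.takeWhile (· != '/')).reverse

theorem afterSlash_no_slash (l : List Char) (h : '/' ∉ l) : afterSlash l = l := by
  unfold afterSlash
  rw [List.takeWhile_eq_self_iff.mpr, List.reverse_reverse]
  intro c hc
  simp only [bne_iff_ne, ne_eq]
  intro hcl
  exact h (by simpa [hcl] using List.mem_reverse.mp hc)

theorem takeWhile_rev_eq (rest : List Char) (h : '/' ∉ rest) :
    List.takeWhile (· != '/') rest.reverse = rest.reverse := by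
  rw [List.takeWhile_eq_self_iff]
  intro x hx
  simp only [bne_iff_ne, ne_eq]
  intro hx'
  exact h (by simpa [hx'] using List.mem_reverse.mp hx)

theorem afterSlash_cons (c : Char) (rest : List Char) :
    afterSlash (c :: rest) =
      if '/' ∈ rest then afterSlash rest else if c = '/' then rest else c :: rest := by
  by_cases h : '/' ∈ rest
  · have hne : ¬ (List.takeWhile (· != '/') rest.reverse).length = rest.length := by
      intro heq
      have hpre := List.takeWhile_prefix (l := rest.reverse) (p := (· != '/'))
      have hself : List.takeWhile (· != '/') rest.reverse = rest.reverse :=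
        hpre.eq_of_length (by simpa using heq)
      have := List.takeWhile_eq_self_iff.mp hself '/' (List.mem_reverse.mpr h)
      simp at this
    simp [afterSlash, List.takeWhile_append, hne, h]
  · have heq := takeWhile_rev_eq rest h
    by_cases hc : c = '/'
    · simp [afterSlash, List.takeWhile_append, heq, h, hc]
    · simp [afterSlash, List.takeWhile_append, heq, h, hc]

theorem dealALoop_eq (l : List Char) : ∀ acc : List Char,
    dealALoop l acc = (l.takeWhile (· != '/')).reverse ++ acc := by
  induction l with
  | nil => intro acc; simp [dealALoop]
  | cons c rest ih =>
    intro acc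
    by_cases hc : c = '/'
    · simp [dealALoop, hc]
    · simp [dealALoop, hc, ih]

theorem go_getLast? (l : List Char) : ∀ (fuel : Nat), l.length ≤ fuel →
    ∀ (cur : List Char) (acc : List (List Char)),
    (PySem.Chars.splitOn.go ['/'] (fuel + 1) l cur acc).getLast? =
      some (if '/' ∈ l then afterSlash l else cur.reverse ++ l) := by
  induction l with
  | nil =>
    intro fuel _ cur acc
    rw [PySem.Chars.splitOn.go.eq_def]
    simp
  | cons c rest ih =>
    intro fuel hfuel cur acc
    obtain ⟨f, rfl⟩ : ∃ f, fuel = f + 1 := by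
      cases fuel with
      | zero => simp at hfuel
      | succ f => exact ⟨f, rfl⟩
    have hrest : rest.length ≤ f := by simpa using hfuel
    rw [PySem.Chars.splitOn.go.eq_def]
    by_cases hc : c = '/'
    · have hpre : List.isPrefixOf ['/'] (c :: rest) = true := by simp [hc]
      simp only [hpre, if_pos, List.length_singleton, List.drop_succ_cons, List.drop_zero]
      rw [ih f hrest [] (cur.reverse :: acc)]
      by_cases hr : '/' ∈ rest
      · simp [hc, hr, afterSlash_cons]
      · simp [hc, hr, afterSlash_cons]
    · have hcs : ¬ '/' = c := fun h => hc h.symm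
      have hpre : List.isPrefixOf ['/'] (c :: rest) = false := by
        simp [List.isPrefixOf]; exact hcs
      simp only [hpre, Bool.false_eq_true, if_false]
      rw [ih f hrest (c :: cur) acc]
      by_cases hr : '/' ∈ rest
      · simp [hr, hcs, afterSlash_cons]
      · simp [hr, hcs]

theorem splitOn_getLast? (s : List Char) :
    (PySem.Chars.splitOn s ['/']).getLast? = some (afterSlash s) := by
  unfold PySem.Chars.splitOn
  rw [go_getLast? s s.length (le_refl _) [] []]
  by_cases h : '/' ∈ s
  · simp [h]
  · simp [h, afterSlash_no_slash s h]

theorem deal_image_url_spec : Claim_equal_deal_image_url := by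
  unfold Claim_equal_deal_image_url
  intro url _
  unfold Spec_deal_image_url deal_image_url deal_image_url_alt
  have hsplit : PySem.Str.split? url "/" =
      some ((PySem.Chars.splitOn url.toList ['/']).map String.ofList) := by
    simp [PySem.Str.split?, PySem.Chars.split?]
  rw [hsplit]
  have hlast : ((PySem.Chars.splitOn url.toList ['/']).map String.ofList).getLast? =
      some (String.ofList (afterSlash url.toList)) := by
    rw [List.getLast?_map, splitOn_getLast?]; rfl
  simp only [List.getLast!_eq_getLast?_getD, hlast, Option.getD_some]
  rw [dealALoop_eq]
  simp [afterSlash, String.ofList]
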